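-- pv_equiv track=rewrite | github.com/Joshjayboy/Competitive_Programming | C_Kenenisa_s_Dilemma.py | sort_with_swaps
-- ===== SOURCE A (Python) =====
-- def sort_with_swaps(n, a):
--     swaps = []
--     # Create a list of indices from 0 to n-1
--     indices = list(range(n))
--
--     # Sort indices based on values in the array
--     indices.sort(key=lambda x: a[x])
--
--     # Create a list to track current positions
--     pos = list(range(n))
--
--     for i in range(n):
--         correct_index = indices[i]
--         if pos[i] != correct_index:
--             # Find where the correct_index is currently located
--             swap_index = pos.index(correct_index)
--
--             # Perform the swap
--             a[i], a[swap_index] = a[swap_index], a[i]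
--             pos[i], pos[swap_index] = pos[swap_index], pos[i]
--             swaps.append((i, swap_index))
--
--     return swaps
-- ===== SOURCE B (Python) =====
-- def sort_with_swaps(n, a):
--     # Different algorithm: instead of maintaining position arrays and scanning
--     # (or inverting) them, record each swap as a forwarding pointer
--     # "the element that was at slot i moved to slot s" and find the current
--     # slot of a target element by chasing pointers from its original home,
--     # union-find style with path compression.  Note: A also permutes `a` in
--     # place; B never touches `a` (the return value is identical).
--     order = sorted(range(n), key=lambda i: a[i])
--     nxt = {}          # slot -> slot its former occupant was displaced to
--     swaps = []
--     for i, t in enumerate(order):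
--         path = []
--         s = t
--         while s in nxt:
--             path.append(s)
--             s = nxt[s]
--         for q in path:    # path compression
--             nxt[q] = s
--         if s != i:
--             swaps.append((i, s))
--             nxt[i] = s
--     return swaps
-- ===== Notes on version B (the rewrite author's own statement) =====
-- stated objective: faster
-- what changed: B keeps no position arrays at all: it records each swap as a forwarding pointer 'the occupant of slot i moved to slot s' in a sparse dict and finds the swap partner by chasing pointers from the target's original slot, union-find style with path compression, instead of A's pos array with a pos.index scan per swap.
import Mathlib
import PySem

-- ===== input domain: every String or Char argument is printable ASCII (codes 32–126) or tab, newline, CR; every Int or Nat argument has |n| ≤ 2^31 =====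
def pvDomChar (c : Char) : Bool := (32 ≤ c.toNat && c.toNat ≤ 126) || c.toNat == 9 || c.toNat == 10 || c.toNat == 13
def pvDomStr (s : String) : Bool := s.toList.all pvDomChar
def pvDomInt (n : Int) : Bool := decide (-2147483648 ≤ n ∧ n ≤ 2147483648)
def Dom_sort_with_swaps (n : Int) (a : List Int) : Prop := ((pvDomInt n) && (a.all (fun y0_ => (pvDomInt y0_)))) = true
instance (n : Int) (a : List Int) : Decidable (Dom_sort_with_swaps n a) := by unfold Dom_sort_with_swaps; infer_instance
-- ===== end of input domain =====

-- B finds each swap partner by chasing forwarding pointers ("the occupant of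
-- slot i moved to slot s") in a sparse dict, union-find style with path
-- compression, instead of A's position array with a pos.index scan.
-- A also permutes its argument list `a` in place while B leaves it untouched —
-- the equivalence proved here is about the RETURN value only.

-- ===== PORT A =====
-- loop body of A's `for i in range(n)` over state (a, pos, swaps)
def aStep (indices : List Int) (st : List Int × List Int × List (Int × Int)) (i : Int) :
    List Int × List Int × List (Int × Int) :=
  let aCur := st.1
  let pos := st.2.1
  let swaps := st.2.2
  let correct := PySem.List.pyGetD indices i 0
  if PySem.List.pyGetD pos i 0 ≠ correct then
    -- swap_index = pos.index(correct_index): always found under Pre_ (pos is a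
    -- permutation of range(n)), so the getD 0 default is never taken
    let swapIndex : Int := ((PySem.List.index? pos correct).getD 0 : Nat)
    let ai := PySem.List.pyGetD aCur i 0
    let aj := PySem.List.pyGetD aCur swapIndex 0
    let aNew := PySem.List.pySetD (PySem.List.pySetD aCur i aj) swapIndex ai
    let pi := PySem.List.pyGetD pos i 0
    let pj := PySem.List.pyGetD pos swapIndex 0
    let posNew := PySem.List.pySetD (PySem.List.pySetD pos i pj) swapIndex pi
    (aNew, posNew, swaps ++ [(i, swapIndex)])
  else st

def sort_with_swaps (n : Int) (a : List Int) : List (Int × Int) :=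
  -- indices = sorted(range(n), key=lambda x: a[x]); a[x] in range under Pre_
  let indices := PySem.List.sorted (PySem.List.pyRange 0 n) (fun x => PySem.List.pyGetD a x 0)
  let pos := PySem.List.pyRange 0 n
  ((PySem.List.pyRange 0 n).foldl (aStep indices) (a, pos, [])).2.2

-- ===== PORT B =====
-- Source B's `while s in nxt: path.append(s); s = nxt[s]`, ported with fuel:
-- forwarding pointers strictly increase and stay below n, so n+1 steps are
-- always enough and the port is exact
def chasePath (fuel : Nat) (nxt : PySem.Dict Int Int) (s : Int) : List Int × Int :=
  match fuel with
  | 0 => ([], s)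
  | f + 1 =>
    match PySem.Dict.get? nxt s with
    | none => ([], s)
    | some v =>
      let pr := chasePath f nxt v
      (s :: pr.1, pr.2)

-- loop body of Source B's `for i, t in enumerate(order)` over state (nxt, swaps)
def cStep (fuel : Nat) (st : PySem.Dict Int Int × List (Int × Int)) (it : Int × Int) :
    PySem.Dict Int Int × List (Int × Int) :=
  let i := it.1
  let t := it.2
  let pr := chasePath fuel st.1 t
  let s := pr.2
  -- `for q in path: nxt[q] = s`  (path compression)
  let d := pr.1.foldl (fun d q => PySem.Dict.insert d q s) st.1
  if s ≠ i then (PySem.Dict.insert d i s, st.2 ++ [(i, s)]) else (d, st.2)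

def sort_with_swaps_alt (n : Int) (a : List Int) : List (Int × Int) :=
  let order := PySem.List.sorted (PySem.List.pyRange 0 n) (fun i => PySem.List.pyGetD a i 0)
  ((PySem.List.enumerate order).foldl (cStep (n.toNat + 1))
      ((PySem.Dict.empty : PySem.Dict Int Int), [])).2

-- ===== PRECONDITION & SPEC =====
-- Pre_ excludes n > len(a), where A's sort key a[x] raises IndexError.
def Pre_sort_with_swaps (n : Int) (a : List Int) : Prop := n ≤ (a.length : Int)
instance (n : Int) (a : List Int) : Decidable (Pre_sort_with_swaps n a) := by
  unfold Pre_sort_with_swaps; infer_instance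

def pvWitness_sort_with_swaps : Int × List Int := (3, [5, 1, 3])

def Spec_sort_with_swaps (n : Int) (a : List Int) (out : List (Int × Int)) : Prop :=
  out = sort_with_swaps_alt n a
instance (n : Int) (a : List Int) (out : List (Int × Int)) : Decidable (Spec_sort_with_swaps n a out) := by
  unfold Spec_sort_with_swaps; infer_instance

-- ===== CLAIM (what is proved, stated in full; the proofs are below) =====
def Claim_equal_sort_with_swaps : Prop := ∀ (n : Int) (a : List Int),
  Dom_sort_with_swaps n a → Pre_sort_with_swaps n a →
  Spec_sort_with_swaps n a (sort_with_swaps n a)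

-- ===== LEMMAS AND PROOFS =====

-- intermediate machine used only by the proofs: A's loop re-expressed over the
-- state (pos, where) with an explicit inverse-position array
def bStep (st : List Int × List Int × List (Int × Int)) (it : Int × Int) :
    List Int × List Int × List (Int × Int) :=
  let pos := st.1
  let wh := st.2.1
  let swaps := st.2.2
  let i := it.1
  let target := it.2
  let j := PySem.List.pyGetD wh target 0
  if j ≠ i then
    let p := PySem.List.pyGetD pos i 0
    let posNew := PySem.List.pySetD (PySem.List.pySetD pos i target) j p
    let whNew := PySem.List.pySetD (PySem.List.pySetD wh target i) p j
    (posNew, whNew, swaps ++ [(i, j)])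
  else st

def PosInv (n : Int) (pos wh : List Int) : Prop :=
  (pos.length : Int) = n ∧ (wh.length : Int) = n ∧
  (∀ j : Int, 0 ≤ j → j < n →
    0 ≤ PySem.List.pyGetD pos j 0 ∧ PySem.List.pyGetD pos j 0 < n ∧
    PySem.List.pyGetD wh (PySem.List.pyGetD pos j 0) 0 = j) ∧
  (∀ c : Int, 0 ≤ c → c < n →
    0 ≤ PySem.List.pyGetD wh c 0 ∧ PySem.List.pyGetD wh c 0 < n ∧
    PySem.List.pyGetD pos (PySem.List.pyGetD wh c 0) 0 = c)

lemma gsd (xs : List Int) (i m v : Int) (hi : 0 ≤ i) (hm : 0 ≤ m)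
    (hlen : i < (xs.length : Int)) :
    PySem.List.pyGetD (PySem.List.pySetD xs i v) m 0 =
      if m = i then v else PySem.List.pyGetD xs m 0 := by
  have hm' : ((m.toNat : Nat) : Int) = m := Int.toNat_of_nonneg hm
  rw [PySem.List.pySetD_of_nonneg xs v hi, ← hm', PySem.List.pyGetD_natCast,
    PySem.List.pyGetD_natCast]
  have hcond : ((m.toNat : Int) = i) ↔ (i.toNat = m.toNat) := by omega
  rw [if_congr hcond rfl rfl]
  by_cases h : i.toNat = m.toNat
  · simp [h, List.getD_eq_getElem?_getD, show m.toNat < xs.length by omega]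
  · simp [h, List.getD_eq_getElem?_getD]

lemma inv_swap (n : Int) (pos wh : List Int) (i c : Int)
    (hInv : PosInv n pos wh) (hi0 : 0 ≤ i) (hin : i < n) (hc0 : 0 ≤ c) (hcn : c < n)
    (hne : PySem.List.pyGetD pos i 0 ≠ c) :
    PosInv n
      (PySem.List.pySetD (PySem.List.pySetD pos i c) (PySem.List.pyGetD wh c 0) (PySem.List.pyGetD pos i 0))
      (PySem.List.pySetD (PySem.List.pySetD wh c i) (PySem.List.pyGetD pos i 0) (PySem.List.pyGetD wh c 0)) := by
  obtain ⟨hlp, hlw, hfwd, hbwd⟩ := hInv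
  obtain ⟨hj0, hjn, hpj⟩ := hbwd c hc0 hcn
  obtain ⟨hp0, hpn, hwp⟩ := hfwd i hi0 hin
  set j : Int := PySem.List.pyGetD wh c 0 with hjdef
  set p : Int := PySem.List.pyGetD pos i 0 with hpdef
  have hji : j ≠ i := fun h => hne (by rw [← hpj, h])
  have hpc : p ≠ c := fun h => hne h
  have hPos' : ∀ m : Int, 0 ≤ m →
      PySem.List.pyGetD (PySem.List.pySetD (PySem.List.pySetD pos i c) j p) m 0 =
        if m = j then p else if m = i then c else PySem.List.pyGetD pos m 0 := by
    intro m hm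
    rw [gsd _ _ _ _ hj0 hm (by rw [PySem.List.length_pySetD]; omega),
      gsd _ _ _ _ hi0 hm (by omega)]
  have hWh' : ∀ m : Int, 0 ≤ m →
      PySem.List.pyGetD (PySem.List.pySetD (PySem.List.pySetD wh c i) p j) m 0 =
        if m = p then j else if m = c then i else PySem.List.pyGetD wh m 0 := by
    intro m hm
    rw [gsd _ _ _ _ hp0 hm (by rw [PySem.List.length_pySetD]; omega),
      gsd _ _ _ _ hc0 hm (by omega)]
  have posInj : ∀ m : Int, 0 ≤ m → m < n → PySem.List.pyGetD pos m 0 = PySem.List.pyGetD pos i 0 → m = i := by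
    intro m h0 h1 he
    have := (hfwd m h0 h1).2.2
    rw [he, hwp] at this; omega
  have posInjJ : ∀ m : Int, 0 ≤ m → m < n → PySem.List.pyGetD pos m 0 = c → m = j := by
    intro m h0 h1 he
    have := (hfwd m h0 h1).2.2
    rw [he] at this; omega
  have whInjC : ∀ m : Int, 0 ≤ m → m < n → PySem.List.pyGetD wh m 0 = j → m = c := by
    intro m h0 h1 he
    have := (hbwd m h0 h1).2.2
    rw [he, hpj] at this; omega
  have whInjP : ∀ m : Int, 0 ≤ m → m < n → PySem.List.pyGetD wh m 0 = i → m = p := by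
    intro m h0 h1 he
    have := (hbwd m h0 h1).2.2
    rw [he, ← hpdef] at this; omega
  refine ⟨by simp [PySem.List.length_pySetD]; omega, by simp [PySem.List.length_pySetD]; omega, ?_, ?_⟩
  · intro m hm0 hmn
    rw [hPos' m hm0]
    by_cases hmj : m = j
    · subst hmj
      rw [if_pos rfl, hWh' p hp0, if_pos rfl]
      exact ⟨hp0, hpn, rfl⟩
    · rw [if_neg hmj]
      by_cases hmi : m = i
      · subst hmi
        rw [if_pos rfl, hWh' c hc0, if_neg (Ne.symm hpc), if_pos rfl]
        exact ⟨hc0, hcn, rfl⟩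
      · rw [if_neg hmi]
        obtain ⟨h0, h1, h2⟩ := hfwd m hm0 hmn
        refine ⟨h0, h1, ?_⟩
        rw [hWh' _ h0]
        have nep : PySem.List.pyGetD pos m 0 ≠ p := fun h => hmi (posInj m hm0 hmn h)
        have nec : PySem.List.pyGetD pos m 0 ≠ c := fun h => hmj (posInjJ m hm0 hmn h)
        rw [if_neg nep, if_neg nec, h2]
  · intro m hm0 hmn
    rw [hWh' m hm0]
    by_cases hmp : m = p
    · subst hmp
      rw [if_pos rfl, hPos' j hj0, if_pos rfl]
      exact ⟨hj0, hjn, rfl⟩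
    · rw [if_neg hmp]
      by_cases hmc : m = c
      · subst hmc
        rw [if_pos rfl, hPos' i hi0, if_neg (Ne.symm hji), if_pos rfl]
        exact ⟨hi0, hin, rfl⟩
      · rw [if_neg hmc]
        obtain ⟨h0, h1, h2⟩ := hbwd m hm0 hmn
        refine ⟨h0, h1, ?_⟩
        rw [hPos' _ h0]
        have nej : PySem.List.pyGetD wh m 0 ≠ j := fun h => hmc (whInjC m hm0 hmn h)
        have nei : PySem.List.pyGetD wh m 0 ≠ i := fun h => hmp (whInjP m hm0 hmn h)
        rw [if_neg nej, if_neg nei, h2]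

lemma index_eq_inverse (n : Int) (pos wh : List Int) (c : Int)
    (hInv : PosInv n pos wh) (hc0 : 0 ≤ c) (hcn : c < n) :
    PySem.List.index? pos c = some (PySem.List.pyGetD wh c 0).toNat := by
  obtain ⟨hlp, hlw, hfwd, hbwd⟩ := hInv
  obtain ⟨hj0, hjn, hpj⟩ := hbwd c hc0 hcn
  set j : Int := PySem.List.pyGetD wh c 0 with hjdef
  have hjl : j.toNat < pos.length := by omega
  have hgetj : pos[j.toNat] = c := by
    rw [← hpj, PySem.List.pyGetD_eq_getElem pos 0 hj0 (by omega)]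
  rw [PySem.List.index?_eq_some_iff]
  refine ⟨pos.take j.toNat, pos.drop (j.toNat + 1), ?_, ?_, ?_⟩
  · conv_lhs => rw [← List.take_append_drop j.toNat pos]
    rw [← List.getElem_cons_drop hjl, hgetj]
  · simp [List.length_take, Nat.min_eq_left (Nat.le_of_lt hjl)]
  · intro hmem
    obtain ⟨k, hk, hkeq⟩ := List.mem_iff_getElem.mp hmem
    rw [List.length_take] at hk
    have hkl : k < pos.length := by omega
    rw [List.getElem_take] at hkeq
    have hposk : PySem.List.pyGetD pos (k : Int) 0 = c := by
      rw [PySem.List.pyGetD_eq_getElem pos 0 (by omega) (by exact_mod_cast hkl)]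
      simpa using hkeq
    obtain ⟨_, _, hwk⟩ := hfwd (k : Int) (by omega) (by omega)
    rw [hposk] at hwk
    omega

lemma inv_init (n : Int) (hn : 0 ≤ n) :
    PosInv n (PySem.List.pyRange 0 n) (PySem.List.pyRange 0 n) := by
  have hlen : ((PySem.List.pyRange 0 n).length : Int) = n := by
    rw [PySem.List.length_pyRange_one]; omega
  have hget : ∀ j : Int, 0 ≤ j → j < n → PySem.List.pyGetD (PySem.List.pyRange 0 n) j 0 = j := by
    intro j hj0 hjn
    rw [PySem.List.pyGetD_eq_getElem _ 0 hj0 (by omega), PySem.List.getElem_pyRange_one]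
    omega
  refine ⟨hlen, hlen, ?_, ?_⟩ <;> intro j hj0 hjn <;>
    simp [hget j hj0 hjn] <;> omega

-- A's loop and the (pos, where) machine produce the same swap list
lemma loop_eq (n : Int) (order : List Int)
    (hlen : (order.length : Int) = n)
    (hord : ∀ c ∈ order, 0 ≤ c ∧ c < n) :
    ∀ (l : List Int) (aA pos wh : List Int) (sw : List (Int × Int)),
    PosInv n pos wh →
    (∀ i ∈ l, 0 ≤ i ∧ i < n) →
    (l.foldl (aStep order) (aA, pos, sw)).2.2
      = (l.foldl (fun st j => bStep st (j, PySem.List.pyGetD order j 0)) (pos, wh, sw)).2.2 := by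
  intro l
  induction l with
  | nil => intro aA pos wh sw _ _; rfl
  | cons i l ih =>
    intro aA pos wh sw hInv hil
    obtain ⟨hi0, hin⟩ := hil i List.mem_cons_self
    have hInv' := hInv
    obtain ⟨hlp, hlw, hfwd, hbwd⟩ := hInv'
    have hcval : PySem.List.pyGetD order i 0 = order[i.toNat] :=
      PySem.List.pyGetD_eq_getElem order 0 hi0 (by omega)
    set c : Int := PySem.List.pyGetD order i 0 with hcdef
    obtain ⟨hc0, hcn⟩ := hord c (hcval ▸ List.getElem_mem (by omega))
    obtain ⟨hj0, hjn, hpj⟩ := hbwd c hc0 hcn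
    set j : Int := PySem.List.pyGetD wh c 0 with hjdef
    simp only [List.foldl_cons]
    by_cases hcond : PySem.List.pyGetD pos i 0 = c
    · have hji : j = i := by rw [hjdef, ← hcond]; exact (hfwd i hi0 hin).2.2
      have hA : aStep order (aA, pos, sw) i = (aA, pos, sw) := by
        simp only [aStep]
        rw [if_neg (by simpa using hcond)]
      have hB : bStep (pos, wh, sw) (i, c) = (pos, wh, sw) := by
        simp only [bStep]
        rw [if_neg (by simpa using hji)]
      rw [hA, hB]
      exact ih aA pos wh sw hInv (fun x hx => hil x (List.mem_cons_of_mem _ hx))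
    · have hji : j ≠ i := fun h => hcond (by rw [← hpj, ← h])
      have hidx : ((PySem.List.index? pos c).getD 0 : Int) = j := by
        rw [index_eq_inverse n pos wh c hInv hc0 hcn]
        simp only [Option.getD_some]
        omega
      have hA : aStep order (aA, pos, sw) i =
          (PySem.List.pySetD (PySem.List.pySetD aA i (PySem.List.pyGetD aA ((PySem.List.index? pos c).getD 0 : Int) 0)) ((PySem.List.index? pos c).getD 0 : Int) (PySem.List.pyGetD aA i 0),
           PySem.List.pySetD (PySem.List.pySetD pos i c) j (PySem.List.pyGetD pos i 0),
           sw ++ [(i, j)]) := by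
        simp only [aStep]
        rw [if_pos (by simpa using hcond)]
        rw [hidx, hpj]
      have hB : bStep (pos, wh, sw) (i, c) =
          (PySem.List.pySetD (PySem.List.pySetD pos i c) j (PySem.List.pyGetD pos i 0),
           PySem.List.pySetD (PySem.List.pySetD wh c i) (PySem.List.pyGetD pos i 0) j,
           sw ++ [(i, j)]) := by
        simp only [bStep]
        rw [if_pos (by simpa using hji)]
      rw [hA, hB]
      exact ih _ _ _ _
        (inv_swap n pos wh i c hInv hi0 hin hc0 hcn hcond)
        (fun x hx => hil x (List.mem_cons_of_mem _ hx))

-- ---------- pointer-chase machinery for B ----------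

-- well-formed forwarding table: keys are previous loop indices (< k),
-- pointers strictly increase and stay below n
def WFD (n k : Int) (d : PySem.Dict Int Int) : Prop :=
  ∀ x v : Int, PySem.Dict.get? d x = some v → 0 ≤ x ∧ x < k ∧ x < v ∧ v < n

lemma chasePath_none (f : Nat) (nxt : PySem.Dict Int Int) (x : Int)
    (h : PySem.Dict.get? nxt x = none) : chasePath (f + 1) nxt x = ([], x) := by
  simp [chasePath, h]

lemma chasePath_some (f : Nat) (nxt : PySem.Dict Int Int) (x v : Int)
    (h : PySem.Dict.get? nxt x = some v) :
    chasePath (f + 1) nxt x = (x :: (chasePath f nxt v).1, (chasePath f nxt v).2) := by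
  simp [chasePath, h]

lemma chase_fuel (n : Int) (nxt : PySem.Dict Int Int)
    (hWF : ∀ x v : Int, PySem.Dict.get? nxt x = some v → x < v ∧ v < n) :
    ∀ (f : Nat) (x : Int) (g : Nat), (n - x).toNat < f → (n - x).toNat < g →
      chasePath f nxt x = chasePath g nxt x := by
  intro f
  induction f with
  | zero => intro x g hf _; omega
  | succ f ih =>
    intro x g hf hg
    cases g with
    | zero => omega
    | succ g =>
      cases hx : PySem.Dict.get? nxt x with
      | none => rw [chasePath_none f nxt x hx, chasePath_none g nxt x hx]
      | some v =>
        obtain ⟨hxv, hvn⟩ := hWF x v hx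
        rw [chasePath_some f nxt x v hx, chasePath_some g nxt x v hx,
          ih v g (by omega) (by omega)]

lemma chase_spec (n : Int) (nxt : PySem.Dict Int Int)
    (hWF : ∀ x v : Int, PySem.Dict.get? nxt x = some v → x < v ∧ v < n) :
    ∀ (f : Nat) (x : Int), (n - x).toNat < f →
      PySem.Dict.get? nxt (chasePath f nxt x).2 = none ∧
      x ≤ (chasePath f nxt x).2 ∧
      ((chasePath f nxt x).1 = [] ∨ (chasePath f nxt x).2 < n) ∧
      (∀ q ∈ (chasePath f nxt x).1, x ≤ q ∧ q < (chasePath f nxt x).2 ∧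
        (PySem.Dict.get? nxt q).isSome ∧
        (∀ g : Nat, (n - q).toNat < g → (chasePath g nxt q).2 = (chasePath f nxt x).2)) := by
  intro f
  induction f with
  | zero => intro x hf; omega
  | succ f ih =>
    intro x hf
    cases hx : PySem.Dict.get? nxt x with
    | none =>
      rw [chasePath_none f nxt x hx]
      exact ⟨hx, le_refl _, Or.inl rfl, by simp⟩
    | some v =>
      obtain ⟨hxv, hvn⟩ := hWF x v hx
      obtain ⟨h1, h2, h3, h4⟩ := ih v (by omega)
      rw [chasePath_some f nxt x v hx]
      refine ⟨h1, by omega, Or.inr ?_, ?_⟩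
      · rcases h3 with h | h
        · have hv : (chasePath f nxt v).2 = v := by
            cases f with
            | zero => omega
            | succ f =>
              cases hv : PySem.Dict.get? nxt v with
              | none => rw [chasePath_none f nxt v hv]
              | some w => rw [chasePath_some f nxt v w hv] at h; simp at h
          rw [hv]; exact hvn
        · exact h
      · intro q hq
        rcases List.mem_cons.mp hq with rfl | hq
        · refine ⟨le_refl _, by omega, by simp [hx], ?_⟩
          intro g hg
          cases g with
          | zero => omega
          | succ g =>
            rw [chasePath_some g nxt q v hx,
              chase_fuel n nxt hWF g v f (by omega) (by omega)]
        · obtain ⟨hq1, hq2, hq3, hq4⟩ := h4 q hq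
          exact ⟨by omega, hq2, hq3, hq4⟩

-- get? after path compression
lemma get?_compress (s : Int) :
    ∀ (path : List Int) (d : PySem.Dict Int Int) (x : Int),
      PySem.Dict.get? (path.foldl (fun d q => PySem.Dict.insert d q s) d) x =
        if x ∈ path then some s else PySem.Dict.get? d x := by
  intro path
  induction path with
  | nil => intro d x; simp
  | cons p ps ih =>
    intro d x
    simp only [List.foldl_cons, ih, PySem.Dict.get?_insert, List.mem_cons]
    by_cases hps : x ∈ ps
    · simp [hps]
    · by_cases hp : x = p <;> simp [hps, hp]

-- path compression does not change any chase endpoint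
lemma chaseVal_compress (n : Int) (nxt : PySem.Dict Int Int)
    (hWF : ∀ x v : Int, PySem.Dict.get? nxt x = some v → x < v ∧ v < n)
    (t : Int) (f0 : Nat) (hf0 : (n - t).toNat < f0) :
    ∀ (g : Nat) (x : Int), (n - x).toNat < g →
      (chasePath g ((chasePath f0 nxt t).1.foldl
          (fun d q => PySem.Dict.insert d q (chasePath f0 nxt t).2) nxt) x).2 =
        (chasePath g nxt x).2 := by
  obtain ⟨hend, -, -, hpath⟩ := chase_spec n nxt hWF f0 t hf0
  set path := (chasePath f0 nxt t).1 with hpathdef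
  set s := (chasePath f0 nxt t).2 with hsdef
  set d' := path.foldl (fun d q => PySem.Dict.insert d q s) nxt with hd'
  have hgc : ∀ x : Int, PySem.Dict.get? d' x =
      if x ∈ path then some s else PySem.Dict.get? nxt x := fun x =>
    get?_compress s path nxt x
  have hsnotp : s ∉ path := fun hsp => absurd (hpath s hsp).2.1 (lt_irrefl s)
  have hds : PySem.Dict.get? d' s = none := by rw [hgc s, if_neg hsnotp, hend]
  intro g
  induction g with
  | zero => intro x hg; omega
  | succ g ih =>
    intro x hg
    by_cases hxp : x ∈ path
    · have hdx : PySem.Dict.get? d' x = some s := by rw [hgc x, if_pos hxp]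
      obtain ⟨hx1, hx2, hx3, hx4⟩ := hpath x hxp
      have hstop : (chasePath g d' s).2 = s := by
        cases g with
        | zero => rfl
        | succ g => rw [chasePath_none g d' s hds]
      rw [chasePath_some g d' x s hdx]
      simp only [hstop]
      exact (hx4 (g + 1) hg).symm
    · have hdx : PySem.Dict.get? d' x = PySem.Dict.get? nxt x := by
        rw [hgc x, if_neg hxp]
      cases hxk : PySem.Dict.get? nxt x with
      | none =>
        rw [chasePath_none g d' x (hdx.trans hxk), chasePath_none g nxt x hxk]
      | some v =>
        obtain ⟨hxv, hvn⟩ := hWF x v hxk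
        rw [chasePath_some g d' x v (hdx.trans hxk), chasePath_some g nxt x v hxk]
        exact ih v (by omega)

-- inserting a fresh terminal pointer i ↦ s redirects exactly the chases that
-- ended at i
lemma chaseVal_insert (n : Int) (d : PySem.Dict Int Int)
    (hWF : ∀ x v : Int, PySem.Dict.get? d x = some v → x < v ∧ v < n)
    (i s : Int) (hi : PySem.Dict.get? d i = none) (hs : PySem.Dict.get? d s = none)
    (his : i < s) (hsn : s < n) :
    ∀ (g : Nat) (x : Int), (n - x).toNat < g →
      (chasePath g (PySem.Dict.insert d i s) x).2 =
        (if (chasePath g d x).2 = i then s else (chasePath g d x).2) := by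
  have hs' : PySem.Dict.get? (PySem.Dict.insert d i s) s = none := by
    rw [PySem.Dict.get?_insert, if_neg (by omega), hs]
  intro g
  induction g with
  | zero => intro x hg; omega
  | succ g ih =>
    intro x hg
    cases hx : PySem.Dict.get? d x with
    | none =>
      by_cases hxi : x = i
      · subst hxi
        have hdx : PySem.Dict.get? (PySem.Dict.insert d x s) x = some s := by
          rw [PySem.Dict.get?_insert, if_pos rfl]
        have hstop : (chasePath g (PySem.Dict.insert d x s) s).2 = s := by
          cases g with
          | zero => omega
          | succ g => rw [chasePath_none g _ s hs']
        rw [chasePath_some g _ x s hdx, chasePath_none g d x hx]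
        simp [hstop]
      · have hdx : PySem.Dict.get? (PySem.Dict.insert d i s) x = none := by
          rw [PySem.Dict.get?_insert, if_neg hxi, hx]
        rw [chasePath_none g _ x hdx, chasePath_none g d x hx]
        simp [hxi]
    | some v =>
      obtain ⟨hxv, hvn⟩ := hWF x v hx
      have hxi : x ≠ i := by intro h; rw [h, hi] at hx; simp at hx
      have hdx : PySem.Dict.get? (PySem.Dict.insert d i s) x = some v := by
        rw [PySem.Dict.get?_insert, if_neg hxi, hx]
      rw [chasePath_some g _ x v hdx, chasePath_some g d x v hx]
      exact ih v (by omega)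

-- the (pos, where) machine and B's pointer-chase machine produce the same swaps
lemma loop2 (n : Int) (order : List Int)
    (hlen : (order.length : Int) = n)
    (hord : ∀ c ∈ order, 0 ≤ c ∧ c < n)
    (hinj : ∀ x y : Int, 0 ≤ x → x < n → 0 ≤ y → y < n →
       PySem.List.pyGetD order x 0 = PySem.List.pyGetD order y 0 → x = y) :
    ∀ (fk : Nat) (k : Int), (n - k).toNat = fk → 0 ≤ k →
    ∀ (pos wh : List Int) (nxt : PySem.Dict Int Int) (sw : List (Int × Int)),
    PosInv n pos wh →
    (∀ m : Int, 0 ≤ m → m < k → PySem.List.pyGetD pos m 0 = PySem.List.pyGetD order m 0) →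
    WFD n k nxt →
    (∀ m : Int, k ≤ m → m < n → ∀ g : Nat, (n - PySem.List.pyGetD order m 0).toNat < g →
      (chasePath g nxt (PySem.List.pyGetD order m 0)).2 =
        PySem.List.pyGetD wh (PySem.List.pyGetD order m 0) 0) →
    ((PySem.List.pyRange k n 1).foldl
        (fun st j => bStep st (j, PySem.List.pyGetD order j 0)) (pos, wh, sw)).2.2
      = ((PySem.List.pyRange k n 1).foldl
          (fun st j => cStep (n.toNat + 1) st (j, PySem.List.pyGetD order j 0)) (nxt, sw)).2 := by
  intro fk
  induction fk with
  | zero =>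
    intro k hk hk0 pos wh nxt sw _ _ _ _
    rw [PySem.List.pyRange_one_eq_nil (by omega)]
    rfl
  | succ fk ih =>
    intro k hk hk0 pos wh nxt sw hInv hPlaced hWFD hChase
    have hkn : k < n := by omega
    rw [PySem.List.pyRange_one_cons hkn]
    simp only [List.foldl_cons]
    have hInv' := hInv
    obtain ⟨hlp, hlw, hfwd, hbwd⟩ := hInv'
    have htval : PySem.List.pyGetD order k 0 = order[k.toNat] :=
      PySem.List.pyGetD_eq_getElem order 0 hk0 (by omega)
    set t : Int := PySem.List.pyGetD order k 0 with htdef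
    obtain ⟨ht0, htn⟩ := hord t (htval ▸ List.getElem_mem (by omega))
    obtain ⟨hj0, hjn, hpj⟩ := hbwd t ht0 htn
    set j : Int := PySem.List.pyGetD wh t 0 with hjdef
    have hWF' : ∀ x v : Int, PySem.Dict.get? nxt x = some v → x < v ∧ v < n :=
      fun x v h => ⟨(hWFD x v h).2.2.1, (hWFD x v h).2.2.2⟩
    have hFt : (n - t).toNat < n.toNat + 1 := by omega
    obtain ⟨hend, -, -, hpathspec⟩ := chase_spec n nxt hWF' (n.toNat + 1) t hFt
    set s : Int := (chasePath (n.toNat + 1) nxt t).2 with hsdef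
    set path := (chasePath (n.toNat + 1) nxt t).1 with hpathdef
    have hsj : s = j := hChase k (le_refl k) hkn _ hFt
    set d := path.foldl (fun d q => PySem.Dict.insert d q s) nxt with hddef
    have hget_d : ∀ x : Int, PySem.Dict.get? d x =
        if x ∈ path then some j else PySem.Dict.get? nxt x := by
      intro x; rw [hddef, get?_compress, hsj]
    have hpath_lt : ∀ q ∈ path, 0 ≤ q ∧ q < k := by
      intro q hq
      obtain ⟨-, -, hq3, -⟩ := hpathspec q hq
      cases hqk : PySem.Dict.get? nxt q with
      | none => rw [hqk] at hq3; simp at hq3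
      | some w => exact ⟨(hWFD q w hqk).1, (hWFD q w hqk).2.1⟩
    have hWFd : ∀ x v : Int, PySem.Dict.get? d x = some v → x < v ∧ v < n := by
      intro x v h
      rw [hget_d x] at h
      by_cases hx : x ∈ path
      · rw [if_pos hx] at h
        obtain ⟨-, hlt, -, -⟩ := hpathspec x hx
        rw [hsj] at hlt
        cases h; exact ⟨hlt, hjn⟩
      · rw [if_neg hx] at h; exact hWF' x v h
    have hKeyd : ∀ x v : Int, PySem.Dict.get? d x = some v → 0 ≤ x ∧ x < k := by
      intro x v h
      rw [hget_d x] at h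
      by_cases hx : x ∈ path
      · exact hpath_lt x hx
      · rw [if_neg hx] at h; exact ⟨(hWFD x v h).1, (hWFD x v h).2.1⟩
    have hchase_d : ∀ (g : Nat) (x : Int), (n - x).toNat < g →
        (chasePath g d x).2 = (chasePath g nxt x).2 := by
      rw [hddef, hpathdef, hsdef]
      exact chaseVal_compress n nxt hWF' t (n.toNat + 1) hFt
    have hcstep : cStep (n.toNat + 1) (nxt, sw) (k, t) =
        if s ≠ k then (PySem.Dict.insert d k s, sw ++ [(k, s)]) else (d, sw) := rfl
    by_cases hjk : j = k
    · -- no swap at this index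
      have hB : bStep (pos, wh, sw) (k, t) = (pos, wh, sw) := by
        simp only [bStep, ← hjdef]
        rw [if_neg (by simpa using hjk)]
      rw [hB, hcstep, if_neg (by simp [hsj, hjk])]
      refine ih (k + 1) (by omega) (by omega) pos wh d sw hInv ?_ ?_ ?_
      · intro m hm0 hmk
        by_cases hmk' : m = k
        · subst hmk'; rw [← htdef, ← hpj, hjk]
        · exact hPlaced m hm0 (by omega)
      · intro x v h
        exact ⟨(hKeyd x v h).1, by have := (hKeyd x v h).2; omega,
          (hWFd x v h).1, (hWFd x v h).2⟩
      · intro m hm hmn g hg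
        rw [hchase_d g _ hg]
        exact hChase m (by omega) hmn g hg
    · -- swap (k, j)
      have hkj : k < j := by
        rcases lt_trichotomy j k with h | h | h
        · exfalso
          have := hPlaced j hj0 h
          rw [hpj] at this
          exact hjk (hinj j k hj0 (by omega) hk0 hkn (by rw [← htdef, this]))
        · exact absurd h hjk
        · exact h
      obtain ⟨hp0, hpn, hwp⟩ := hfwd k hk0 hkn
      set p : Int := PySem.List.pyGetD pos k 0 with hpdef
      have hne : p ≠ t := by
        intro h
        apply hjk
        rw [hjdef, ← h, hpdef, hwp]
      have hB : bStep (pos, wh, sw) (k, t) =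
          (PySem.List.pySetD (PySem.List.pySetD pos k t) j p,
           PySem.List.pySetD (PySem.List.pySetD wh t k) p j,
           sw ++ [(k, j)]) := by
        simp only [bStep, ← hjdef, ← hpdef]
        rw [if_pos (by simpa using hjk)]
      rw [hB, hcstep, if_pos (by simp [hsj, hjk]), hsj]
      have hdknone : PySem.Dict.get? d k = none := by
        rw [hget_d k, if_neg (fun h => absurd (hpath_lt k h).2 (lt_irrefl k))]
        cases hkk : PySem.Dict.get? nxt k with
        | none => rfl
        | some w => exact absurd (hWFD k w hkk).2.1 (lt_irrefl k)
      have hdjnone : PySem.Dict.get? d j = none := by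
        rw [hget_d j, if_neg (fun h => absurd (hpath_lt j h).2 (by omega))]
        cases hjj : PySem.Dict.get? nxt j with
        | none => rfl
        | some w => exact absurd (hWFD j w hjj).2.1 (by omega)
      refine ih (k + 1) (by omega) (by omega) _ _ _ _
        (inv_swap n pos wh k t hInv hk0 hkn ht0 htn (by rw [← hpdef]; exact hne)) ?_ ?_ ?_
      · -- placed prefix
        intro m hm0 hmk
        rw [gsd _ _ _ _ hj0 hm0 (by rw [PySem.List.length_pySetD]; omega),
          gsd _ _ _ _ hk0 hm0 (by omega)]
        rw [if_neg (by omega)]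
        by_cases hmk' : m = k
        · rw [if_pos hmk', hmk', ← htdef]
        · rw [if_neg hmk']
          exact hPlaced m hm0 (by omega)
      · -- table well-formedness
        intro x v h
        rw [PySem.Dict.get?_insert] at h
        by_cases hxk : x = k
        · rw [if_pos hxk] at h
          cases h
          exact ⟨by omega, by omega, by omega, hjn⟩
        · rw [if_neg hxk] at h
          exact ⟨(hKeyd x v h).1, by have := (hKeyd x v h).2; omega,
            (hWFd x v h).1, (hWFd x v h).2⟩
      · -- chase invariant
        intro m hm hmn g hg
        have ht'mem : PySem.List.pyGetD order m 0 ∈ order := by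
          rw [PySem.List.pyGetD_eq_getElem order 0 (by omega) (by omega)]
          exact List.getElem_mem (by omega)
        obtain ⟨ht'0, ht'n⟩ := hord _ ht'mem
        have ht't : PySem.List.pyGetD order m 0 ≠ t := by
          intro h
          have := hinj m k (by omega) hmn hk0 hkn (by rw [h, htdef])
          omega
        have hwh_p : PySem.List.pyGetD wh p 0 = k := by rw [hpdef]; exact hwp
        rw [chaseVal_insert n d hWFd k j hdknone hdjnone hkj hjn g _ hg,
          hchase_d g _ hg, hChase m (by omega) hmn g hg]
        rw [gsd _ _ _ _ hp0 ht'0 (by rw [PySem.List.length_pySetD]; omega),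
          gsd _ _ _ _ ht0 ht'0 (by omega)]
        rw [if_neg ht't]
        by_cases hpt : PySem.List.pyGetD order m 0 = p
        · rw [if_pos hpt, hpt, hwh_p, if_pos rfl]
        · rw [if_neg hpt, if_neg ?_]
          intro h
          apply hpt
          have := (hbwd _ ht'0 ht'n).2.2
          rw [h] at this
          rw [hpdef, ← this]

-- ===== VERDICT (by name: the statement is the Claim_ definition above) =====
theorem sort_with_swaps_spec : Claim_equal_sort_with_swaps := by
  intro n a _hdom hpre
  unfold Spec_sort_with_swaps Pre_sort_with_swaps at *
  by_cases hn : 0 < n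
  · have hn0 : 0 ≤ n := le_of_lt hn
    simp only [sort_with_swaps, sort_with_swaps_alt]
    set order := PySem.List.sorted (PySem.List.pyRange 0 n) (fun x => PySem.List.pyGetD a x 0) with hor
    have hlen : (order.length : Int) = n := by
      rw [hor, PySem.List.length_sorted, PySem.List.length_pyRange_one]; omega
    have hord : ∀ c ∈ order, 0 ≤ c ∧ c < n := by
      intro c hc
      rw [hor, PySem.List.mem_sorted, PySem.List.mem_pyRange_one] at hc
      exact hc
    have hnd : order.Nodup := by
      rw [hor]
      exact ((PySem.List.sorted_perm _ _ _).nodup_iff).mpr (PySem.List.nodup_pyRange_one 0 n)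
    have hinj : ∀ x y : Int, 0 ≤ x → x < n → 0 ≤ y → y < n →
        PySem.List.pyGetD order x 0 = PySem.List.pyGetD order y 0 → x = y := by
      intro x y hx0 hxn hy0 hyn he
      rw [PySem.List.pyGetD_eq_getElem order 0 hx0 (by omega),
        PySem.List.pyGetD_eq_getElem order 0 hy0 (by omega)] at he
      have := (List.Nodup.getElem_inj_iff hnd).mp he
      omega
    have henum : PySem.List.enumerate order =
        (PySem.List.pyRange 0 n 1).map (fun jj => (jj, PySem.List.pyGetD order jj 0)) := by
      rw [PySem.List.enumerate_eq_map_pyRange order 0]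
      congr 1
      simp [PySem.List.len, hlen]
    rw [henum, List.foldl_map]
    have hwhinit : ∀ c : Int, 0 ≤ c → c < n →
        PySem.List.pyGetD (PySem.List.pyRange 0 n) c 0 = c := by
      intro c hc0 hcn
      rw [PySem.List.pyGetD_eq_getElem _ 0 hc0
        (by rw [PySem.List.length_pyRange_one]; omega), PySem.List.getElem_pyRange_one]
      omega
    calc ((PySem.List.pyRange 0 n).foldl (aStep order) (a, PySem.List.pyRange 0 n, [])).2.2
        = ((PySem.List.pyRange 0 n).foldl
            (fun st j => bStep st (j, PySem.List.pyGetD order j 0))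
            (PySem.List.pyRange 0 n, PySem.List.pyRange 0 n, [])).2.2 :=
          loop_eq n order hlen hord (PySem.List.pyRange 0 n) a _ _ []
            (inv_init n hn0) (fun i hi => PySem.List.mem_pyRange_one.mp hi)
      _ = ((PySem.List.pyRange 0 n).foldl
            (fun st j => cStep (n.toNat + 1) st (j, PySem.List.pyGetD order j 0))
            ((PySem.Dict.empty : PySem.Dict Int Int), [])).2 := by
          refine loop2 n order hlen hord hinj (n - 0).toNat 0 rfl (le_refl 0)
            (PySem.List.pyRange 0 n) (PySem.List.pyRange 0 n)
            (PySem.Dict.empty : PySem.Dict Int Int) [] (inv_init n hn0)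
            (fun m hm0 hmk => by omega) (fun x v h => by simp at h) ?_
          intro m hm hmn g hg
          set c : Int := PySem.List.pyGetD order m 0 with hcdef
          have hcmem : c ∈ order := by
            rw [hcdef, PySem.List.pyGetD_eq_getElem order 0 (by omega) (by omega)]
            exact List.getElem_mem (by omega)
          obtain ⟨hc0, hcn⟩ := hord c hcmem
          cases g with
          | zero => omega
          | succ g =>
            rw [chasePath_none g _ c (by simp), hwhinit c hc0 hcn]
  · have hnil : PySem.List.pyRange 0 n = [] := PySem.List.pyRange_one_eq_nil (by omega)
    have hsn : PySem.List.sorted ([] : List Int) (fun x => PySem.List.pyGetD a x 0) = [] :=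
      rfl
    simp [sort_with_swaps, sort_with_swaps_alt, hnil, hsn, PySem.List.enumerate_nil]
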